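-- pv_equiv track=rewrite | github.com/ALEJOOYT/CifradoresClasicosWeb | cifradores/playFair.py | prepararBigramas
-- ===== SOURCE A (Python) =====
-- def prepararBigramas(texto):
--     """
--     Prepara el texto en bigramas (pares de letras) para el cifrado PlayFair.
--
--     Args:
--         texto (str): Texto a preparar.
--
--     Returns:
--         list: Lista de bigramas preparados para el cifrado.
--     """
--     # Convertir a mayúsculas, eliminar espacios y caracteres no alfabéticos
--     texto = ''.join(c.upper() for c in texto if c.isalpha())
--
--     # Reemplazar J por I (convención del cifrado PlayFair)
--     texto = texto.replace("J", "I")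
--
--     # Crear bigramas
--     bigramas = []
--     i = 0
--     while i < len(texto):
--         # Si llegamos al final con un carácter impar, añadir 'X'
--         if i == len(texto) - 1:
--             bigramas.append(texto[i] + 'X')
--             i += 1
--         # Si los dos caracteres son iguales, insertar 'X'
--         elif texto[i] == texto[i+1]:
--             bigramas.append(texto[i] + 'X')
--             i += 1
--         else:
--             bigramas.append(texto[i:i+2])
--             i += 2
--
--     return bigramas
-- ===== SOURCE B (Python) =====
-- def prepararBigramas(texto):
--     # Same cleanup as the original, then a look-behind padded build + a separate chunking pass
--     limpio = ''.join(c.upper() for c in texto if c.isalpha()).replace("J", "I")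
--     t = []
--     for c in limpio:
--         if len(t) % 2 == 1 and t[-1] == c:
--             t.append('X')
--         t.append(c)
--     if len(t) % 2 == 1:
--         t.append('X')
--     return [''.join(t[i:i+2]) for i in range(0, len(t), 2)]
-- ===== Notes on version B (the rewrite author's own statement) =====
-- stated objective: alternative
-- what changed: Replaces the look-ahead, variable-step index while-loop with a look-behind parity build of a padded character list followed by a separate fixed-step chunking pass.
import Mathlib
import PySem

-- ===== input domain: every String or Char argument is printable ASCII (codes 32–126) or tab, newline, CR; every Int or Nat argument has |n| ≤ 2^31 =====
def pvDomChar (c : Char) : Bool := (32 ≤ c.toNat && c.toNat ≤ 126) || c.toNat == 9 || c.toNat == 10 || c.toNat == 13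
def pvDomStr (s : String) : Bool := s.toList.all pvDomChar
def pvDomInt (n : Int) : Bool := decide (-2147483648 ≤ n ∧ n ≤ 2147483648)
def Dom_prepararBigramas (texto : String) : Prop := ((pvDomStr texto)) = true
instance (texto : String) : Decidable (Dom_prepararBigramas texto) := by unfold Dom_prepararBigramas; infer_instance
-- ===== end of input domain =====

-- B replaces A's look-ahead variable-step index loop by a look-behind padded build plus a
-- separate chunking pass (objective: alternative decomposition, same cost).

-- ===== PORT A =====
-- shared cleanup (both Pythons have the identical line):
-- ''.join(c.upper() for c in texto if c.isalpha())  then  .replace("J", "I")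
def pvLimpio (texto : String) : List Char :=
  PySem.Chars.replace ((texto.toList.filter PySem.Chars.isalpha).map PySem.Chars.upperChar)
    ['J'] ['I']

-- A's while-loop: 'last char → c+X, advance 1; equal pair → c+X, advance 1; else pair, advance 2'
def pvLoopA : List Char → List String
  | [] => []
  | [c] => [String.ofList [c, 'X']]
  | a :: b :: rest =>
    if a = b then String.ofList [a, 'X'] :: pvLoopA (b :: rest)
    else String.ofList [a, b] :: pvLoopA rest

def prepararBigramas (texto : String) : List String :=
  pvLoopA (pvLimpio texto)

-- ===== PORT B =====
-- one step of B's build loop: if len(t) is odd and t[-1] == c, append 'X'; then append c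
def pvStepB (t : List Char) (c : Char) : List Char :=
  (if t.length % 2 = 1 ∧ PySem.List.pyGet? t (-1) = some c then t ++ ['X'] else t) ++ [c]

-- the trailing pad: if len(t) is odd, append 'X'
def pvPadB (t : List Char) : List Char :=
  if t.length % 2 = 1 then t ++ ['X'] else t

-- [''.join(t[i:i+2]) for i in range(0, len(t), 2)]
def pvChunksB (t : List Char) : List String :=
  (PySem.List.pyRange 0 (PySem.List.len t) 2).map
    (fun i => String.ofList (PySem.List.slice t (some i) (some (i + 2))))

def prepararBigramas_alt (texto : String) : List String :=
  pvChunksB (pvPadB ((pvLimpio texto).foldl pvStepB []))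

-- ===== PRECONDITION & SPEC =====
def Spec_prepararBigramas (texto : String) (out : List String) : Prop := out = prepararBigramas_alt texto
instance (texto : String) (out : List String) : Decidable (Spec_prepararBigramas texto out) := by unfold Spec_prepararBigramas; infer_instance

-- ===== CLAIM (what is proved, stated in full; the proofs are below) =====
def Claim_equal_prepararBigramas : Prop := ∀ (texto : String), Dom_prepararBigramas texto → Spec_prepararBigramas texto (prepararBigramas texto)

-- ===== LEMMAS AND PROOFS =====

-- proof-only recursive characterisation of B's chunking comprehension
def pvChunk2 : List Char → List String
  | [] => []
  | [a] => [String.ofList [a]]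
  | a :: b :: r => String.ofList [a, b] :: pvChunk2 r

lemma pvChunk2_append (t u : List Char) (h : t.length % 2 = 0) :
    pvChunk2 (t ++ u) = pvChunk2 t ++ pvChunk2 u := by
  induction t using pvChunk2.induct with
  | case1 => simp [pvChunk2]
  | case2 a => simp at h
  | case3 a b r ih =>
    simp only [List.length_cons] at h
    simp [pvChunk2, ih (by omega)]

lemma pvChunk2_range_aux (t : List Char) :
    (List.range ((t.length + 1) / 2)).map
      (fun k => String.ofList ((t.drop (2 * k)).take 2)) = pvChunk2 t := by
  induction t using pvChunk2.induct with
  | case1 => simp [pvChunk2]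
  | case2 a => simp [pvChunk2]
  | case3 a b r ih =>
    have hlen : ((a :: b :: r).length + 1) / 2 = (r.length + 1) / 2 + 1 := by
      simp only [List.length_cons]; omega
    rw [hlen, List.range_succ_eq_map, List.map_cons, List.map_map]
    simp only [pvChunk2]
    refine List.cons_eq_cons.mpr ⟨by simp, ?_⟩
    rw [← ih]
    apply List.map_congr_left
    intro k _
    simp only [Function.comp_apply]
    rw [show 2 * (k + 1) = 2 * k + 1 + 1 by ring, List.drop_succ_cons, List.drop_succ_cons]

lemma pvChunk2_range (t : List Char) : pvChunksB t = pvChunk2 t := by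
  unfold pvChunksB
  rw [PySem.List.len_eq, PySem.List.pyRange_of_pos 0 (t.length : Int) (by omega), List.map_map]
  have hcount : (if (0 : Int) < (t.length : Int)
      then (((t.length : Int) - 0 + 2 - 1) / 2).toNat else 0) = (t.length + 1) / 2 := by
    split_ifs with h <;> omega
  rw [hcount, ← pvChunk2_range_aux]
  apply List.map_congr_left
  intro k _
  simp only [Function.comp_apply]
  rw [PySem.List.slice_toNat t (by omega) (by omega)]
  have e1 : ((0 : Int) + 2 * (k : Int)).toNat = 2 * k := by omega
  have e2 : ((0 : Int) + 2 * (k : Int) + 2).toNat - 2 * k = 2 := by omega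
  rw [e1, e2]

-- the main invariant: B's build loop, seeded with an even prefix plus one pending char,
-- produces (after pad+chunk) that prefix's bigrams followed by A's bigrams of the rest
lemma pvInvariant : ∀ n (cs : List Char), cs.length ≤ n → ∀ (t : List Char) (c : Char),
    t.length % 2 = 0 →
    pvChunk2 (pvPadB (List.foldl pvStepB (t ++ [c]) cs)) = pvChunk2 t ++ pvLoopA (c :: cs) := by
  intro n
  induction n with
  | zero =>
    intro cs hcs t c ht
    have hnil : cs = [] := by cases cs <;> simp_all
    subst hnil
    simp only [List.foldl_nil, pvPadB, pvLoopA]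
    rw [if_pos (by simp [List.length_append]; omega), List.append_assoc,
      pvChunk2_append t ([c] ++ ['X']) ht]
    simp [pvChunk2]
  | succ m ih =>
    intro cs hcs t c ht
    cases cs with
    | nil =>
      simp only [List.foldl_nil, pvPadB, pvLoopA]
      rw [if_pos (by simp [List.length_append]; omega), List.append_assoc,
        pvChunk2_append t ([c] ++ ['X']) ht]
      simp [pvChunk2]
    | cons d cs' =>
      simp only [List.foldl_cons]
      have hodd : (t ++ [c]).length % 2 = 1 := by simp [List.length_append]; omega
      have hstep : pvStepB (t ++ [c]) d
          = if c = d then (t ++ [c, 'X']) ++ [d] else t ++ [c, d] := by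
        simp only [pvStepB, PySem.List.pyGet?_neg_one_append_singleton, hodd,
          Option.some.injEq, true_and]
        by_cases h : c = d
        · subst h; simp
        · rw [if_neg h, if_neg h]
          simp
      rw [hstep]
      by_cases hcd : c = d
      · rw [if_pos hcd]
        have heven : (t ++ [c, 'X']).length % 2 = 0 := by simp [List.length_append]; omega
        have hlen : cs'.length ≤ m := by simp only [List.length_cons] at hcs; omega
        rw [ih cs' hlen _ d heven, pvChunk2_append t [c, 'X'] ht]
        simp [pvLoopA, hcd, pvChunk2]
      · rw [if_neg hcd]
        have heven : (t ++ [c, d]).length % 2 = 0 := by simp [List.length_append]; omega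
        cases cs' with
        | nil =>
          simp only [List.foldl_nil, pvPadB]
          rw [if_neg (by omega), pvChunk2_append t [c, d] ht]
          simp [pvLoopA, hcd, pvChunk2]
        | cons e cs'' =>
          simp only [List.foldl_cons]
          have hstep2 : pvStepB (t ++ [c, d]) e = (t ++ [c, d]) ++ [e] := by
            simp only [pvStepB]
            rw [if_neg (fun h => by omega)]
          have hlen : cs''.length ≤ m := by simp only [List.length_cons] at hcs; omega
          rw [hstep2, ih cs'' hlen (t ++ [c, d]) e heven, pvChunk2_append t [c, d] ht]
          simp [pvLoopA, hcd, pvChunk2]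

lemma pvBuild_eq (cs : List Char) :
    pvChunk2 (pvPadB (List.foldl pvStepB [] cs)) = pvLoopA cs := by
  cases cs with
  | nil => simp [pvPadB, pvChunk2, pvLoopA]
  | cons c cs' =>
    have h := pvInvariant cs'.length cs' le_rfl [] c (by simp)
    simpa [pvChunk2] using h

-- ===== VERDICT (by name: the statement is the Claim_ definition above) =====
theorem prepararBigramas_spec : Claim_equal_prepararBigramas := by
  intro texto _
  unfold Spec_prepararBigramas prepararBigramas prepararBigramas_alt
  rw [pvChunk2_range, pvBuild_eq]
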